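-- pv_equiv track=rewrite | github.com/pauldeveaux/PP2I_1-Jardiquest | jardiquest/model/path/suggestion_model.py | tri_loop
-- ===== SOURCE A (Python) =====
-- def tri_loop(tab, last):  # recursive sorting of batches to maximize diversity
--     liste = tab[:]
--     memoire = []
--     panier = []
--     for i in range(0, len(liste)):
--         if liste[i][0] not in memoire:
--             memoire.append(liste[i][0])
--             panier.append(liste[i])
--             liste[i] = 0
--     liste = [value for value in liste if value != 0]
--
--     if liste:
--         return tri_loop(liste, last + panier)
--     else:
--         return last + panier
-- ===== SOURCE B (Python) =====
-- def tri_loop(tab, last):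
--     # One pass: bucket each item by its per-key occurrence index, then concatenate buckets.
--     counts = {}
--     buckets = []
--     for item in tab:
--         k = item[0]
--         i = counts.get(k, 0)
--         counts[k] = i + 1
--         if i == len(buckets):
--             buckets.append([])
--         buckets[i].append(item)
--     out = list(last)
--     for b in buckets:
--         out += b
--     return out
-- ===== Notes on version B (the rewrite author's own statement) =====
-- stated objective: alternative
-- what changed: A repeatedly rescans and rebuilds the remaining list, one recursive pass per maximal key multiplicity; B makes a single pass that assigns each item its per-key occurrence index via a counter dict and appends it to the corresponding bucket, then concatenates the buckets.
import Mathlib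
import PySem

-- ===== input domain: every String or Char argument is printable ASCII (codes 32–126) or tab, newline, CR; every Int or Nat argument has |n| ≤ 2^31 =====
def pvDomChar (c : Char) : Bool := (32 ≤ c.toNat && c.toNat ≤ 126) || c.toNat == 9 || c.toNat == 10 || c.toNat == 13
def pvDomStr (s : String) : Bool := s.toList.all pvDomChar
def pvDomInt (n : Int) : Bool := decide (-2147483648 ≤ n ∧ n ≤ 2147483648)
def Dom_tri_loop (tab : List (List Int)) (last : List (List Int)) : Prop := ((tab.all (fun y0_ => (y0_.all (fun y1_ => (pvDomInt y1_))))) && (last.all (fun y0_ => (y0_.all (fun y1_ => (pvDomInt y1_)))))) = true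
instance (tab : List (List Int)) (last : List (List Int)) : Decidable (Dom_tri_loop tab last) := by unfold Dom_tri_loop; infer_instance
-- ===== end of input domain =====

-- B replaces A's one-recursive-pass-per-multiplicity rescanning by a single counting pass into
-- occurrence-index buckets that are then concatenated (objective: alternative algorithm).

-- ===== PORT A =====
-- item[0]: Python raises IndexError on an empty item (excluded by Pre_); modelled as Option
def aKey (x : List Int) : Option Int := PySem.List.pyGet? x 0

-- body of A's for-loop; state = (liste so far, memoire, panier); 'liste[i] = 0' is ported as
-- marking the slot none (the sentinel 0 is not a list, so 'value != 0' keeps exactly the non-marked slots)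
def aStep (st : List (Option (List Int)) × List (Option Int) × List (List Int)) (x : List Int) :
    List (Option (List Int)) × List (Option Int) × List (List Int) :=
  if aKey x ∈ st.2.1 then (st.1 ++ [some x], st.2.1, st.2.2)
  else (st.1 ++ [none], st.2.1 ++ [aKey x], st.2.2 ++ [x])

-- liste = tab[:], then the for-loop over its indices
def aPass (tab : List (List Int)) : List (Option (List Int)) × List (Option Int) × List (List Int) :=
  tab.foldl aStep ([], [], [])

-- only used by tri_loop's decreasing_by: the filtered list plus the panier account for all slots
theorem aStep_len (l : List (List Int)) (ls : List (Option (List Int)))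
    (mem : List (Option Int)) (pan : List (List Int)) :
    ((l.foldl aStep (ls, mem, pan)).1.filterMap id).length + (l.foldl aStep (ls, mem, pan)).2.2.length
      = (ls.filterMap id).length + pan.length + l.length := by
  induction l generalizing ls mem pan with
  | nil => simp
  | cons x xs ih =>
    simp only [List.foldl_cons, aStep]
    split
    · rw [ih]; simp; omega
    · rw [ih]; simp; omega

-- only used by tri_loop's decreasing_by: on a nonempty list the panier is nonempty
theorem aStep_pan_pos (x : List Int) (xs : List (List Int)) :
    1 ≤ ((x :: xs).foldl aStep ([], [], [])).2.2.length := by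
  have h : ∀ (l : List (List Int)) ls mem (pan : List (List Int)),
      pan.length ≤ (l.foldl aStep (ls, mem, pan)).2.2.length := by
    intro l
    induction l with
    | nil => intro _ _ _; simp
    | cons y ys ih =>
      intro ls mem pan
      simp only [List.foldl_cons, aStep]
      split
      · exact ih _ _ _
      · have := ih (ls ++ [none]) (mem ++ [aKey y]) (pan ++ [y]); simp at this; omega
  simpa [aStep] using h xs [none] [aKey x] [x]

-- only used by tri_loop's decreasing_by
theorem aPass_dec (tab : List (List Int)) (h : (aPass tab).1.filterMap id ≠ []) :
    ((aPass tab).1.filterMap id).length < tab.length := by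
  cases tab with
  | nil => simp [aPass] at h
  | cons x xs =>
    have h1 := aStep_len (x :: xs) [] [] []
    have h2 := aStep_pan_pos x xs
    simp only [aPass]
    simp only [List.filterMap_nil, List.length_nil, Nat.zero_add, List.length_cons] at h1 ⊢
    omega

def tri_loop (tab : List (List Int)) (last : List (List Int)) : List (List Int) :=
  -- the for-loop; then liste = [value for value in liste if value != 0]
  let res := aPass tab
  let liste := res.1.filterMap id
  let panier := res.2.2
  if h : liste ≠ [] then tri_loop liste (last ++ panier)
  else last ++ panier
termination_by tab.length
decreasing_by exact aPass_dec tab h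

-- ===== PORT B =====
-- body of B's for-loop; state = (counts, buckets); k = item[0] as in A's port
def bStep (st : PySem.Dict (Option Int) Nat × List (List (List Int))) (x : List Int) :
    PySem.Dict (Option Int) Nat × List (List (List Int)) :=
  let k := PySem.List.pyGet? x 0
  let i := st.1.getD k 0
  (st.1.insert k (i + 1),
   (if i = st.2.length then st.2 ++ [[]] else st.2).modify i (· ++ [x]))

def tri_loop_alt (tab : List (List Int)) (last : List (List Int)) : List (List Int) :=
  let res := tab.foldl bStep (PySem.Dict.empty, [])
  res.2.foldl (fun out b => out ++ b) last

-- ===== PRECONDITION & SPEC =====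
-- Pre_ excludes exactly the inputs on which Python A raises IndexError: an empty inner list in tab
-- (liste[i][0] has no element there); B's Python raises on the same inputs.
def Pre_tri_loop (tab : List (List Int)) (last : List (List Int)) : Prop :=
  ∀ x ∈ tab, x ≠ []
instance (tab : List (List Int)) (last : List (List Int)) : Decidable (Pre_tri_loop tab last) := by
  unfold Pre_tri_loop; infer_instance

def pvWitness_tri_loop : List (List Int) × List (List Int) :=
  ([[1, 2], [1, 3], [2, 4], [1, 5]], [[9]])

def Spec_tri_loop (tab : List (List Int)) (last : List (List Int)) (out : List (List Int)) : Prop := out = tri_loop_alt tab last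
instance (tab : List (List Int)) (last : List (List Int)) (out : List (List Int)) : Decidable (Spec_tri_loop tab last out) := by unfold Spec_tri_loop; infer_instance

-- ===== CLAIM (what is proved, stated in full; the proofs are below) =====
def Claim_equal_tri_loop : Prop := ∀ (tab : List (List Int)) (last : List (List Int)), Dom_tri_loop tab last → Pre_tri_loop tab last → Spec_tri_loop tab last (tri_loop tab last)

-- ===== LEMMAS AND PROOFS =====

-- occurrence-index machinery: annF annotates each item with the number of earlier same-key items
def bump (cnt : Option Int → Nat) (k : Option Int) : Option Int → Nat :=
  fun k' => if k' = k then cnt k + 1 else cnt k'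

def annF (cnt : Option Int → Nat) : List (List Int) → List (Nat × List Int)
  | [] => []
  | x :: xs => (cnt (aKey x), x) :: annF (bump cnt (aKey x)) xs

-- the items whose occurrence index (relative to cnt) is i, in order
def grpF (cnt : Option Int → Nat) (l : List (List Int)) (i : Nat) : List (List Int) :=
  ((annF cnt l).filter (fun p => p.1 = i)).map (·.2)

-- the items a pass of A leaves behind: occurrence index ≥ 1
def restAnn (cnt : Option Int → Nat) (l : List (List Int)) : List (List Int) :=
  ((annF cnt l).filter (fun p => ¬ p.1 = 0)).map (·.2)

def cnt0 : Option Int → Nat := fun _ => 0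

def joinUpTo (l : List (List Int)) (n : Nat) : List (List Int) :=
  ((List.range n).map (fun i => grpF cnt0 l i)).flatten

theorem A_pass (l : List (List Int)) (cnt : Option Int → Nat) (ls : List (Option (List Int)))
    (mem : List (Option Int)) (pan : List (List Int)) (hmem : ∀ k, k ∈ mem ↔ 0 < cnt k) :
    (l.foldl aStep (ls, mem, pan)).1
        = ls ++ (annF cnt l).map (fun p => if p.1 = 0 then none else some p.2)
    ∧ (l.foldl aStep (ls, mem, pan)).2.2 = pan ++ grpF cnt l 0 := by
  induction l generalizing cnt ls mem pan with
  | nil => simp [annF, grpF]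
  | cons x xs ih =>
    simp only [List.foldl_cons, aStep]
    by_cases hx : aKey x ∈ mem
    · have h0 : ¬ cnt (aKey x) = 0 := by have := (hmem (aKey x)).mp hx; omega
      rw [if_pos hx]
      have hmem' : ∀ k, k ∈ mem ↔ 0 < bump cnt (aKey x) k := by
        intro k; unfold bump; split_ifs with hk
        · subst hk; exact ⟨fun _ => by omega, fun _ => hx⟩
        · exact hmem k
      obtain ⟨h1, h2⟩ := ih (bump cnt (aKey x)) (ls ++ [some x]) mem pan hmem'
      constructor
      · rw [h1]; simp [annF, h0]
      · rw [h2]; simp [grpF, annF, h0]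
    · have h0 : cnt (aKey x) = 0 := by
        by_contra hc
        exact hx ((hmem (aKey x)).mpr (by omega))
      rw [if_neg hx]
      have hmem' : ∀ k, k ∈ mem ++ [aKey x] ↔ 0 < bump cnt (aKey x) k := by
        intro k; unfold bump; split_ifs with hk
        · subst hk; simp
        · simp [hk, hmem k]
      obtain ⟨h1, h2⟩ := ih (bump cnt (aKey x)) (ls ++ [none]) (mem ++ [aKey x]) (pan ++ [x]) hmem'
      constructor
      · rw [h1]; simp [annF, h0]
      · rw [h2]; simp [grpF, annF, h0]

theorem restAnn_filterMap (ps : List (Nat × List Int)) :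
    (ps.map (fun p => if p.1 = 0 then none else some p.2)).filterMap id
      = (ps.filter (fun p => ¬ p.1 = 0)).map (·.2) := by
  induction ps with
  | nil => simp
  | cons p ps ih =>
    by_cases h : p.1 = 0 <;>
      simp only [List.filterMap_map, Function.comp_def, decide_not, id_eq] at ih ⊢ <;>
      simp [h, ih]

theorem ann_shift (l : List (List Int)) (cnt cnt' : Option Int → Nat)
    (h : ∀ k, cnt' k = cnt k - 1) :
    annF cnt' (restAnn cnt l) = ((annF cnt l).filter (fun p => ¬ p.1 = 0)).map (fun p => (p.1 - 1, p.2)) := by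
  induction l generalizing cnt cnt' with
  | nil => simp [annF, restAnn]
  | cons x xs ih =>
    by_cases h0 : cnt (aKey x) = 0
    · have hrest : restAnn cnt (x :: xs) = restAnn (bump cnt (aKey x)) xs := by
        simp [restAnn, annF, h0]
      rw [hrest, ih (bump cnt (aKey x)) cnt' (by
        intro k; unfold bump; split_ifs with hk
        · subst hk; rw [h (aKey x), h0]
        · exact h k)]
      simp [annF, h0]
    · have hrest : restAnn cnt (x :: xs) = x :: restAnn (bump cnt (aKey x)) xs := by
        simp [restAnn, annF, h0]
      rw [hrest]
      simp only [annF]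
      rw [ih (bump cnt (aKey x)) (bump cnt' (aKey x)) (by
        intro k; unfold bump; rw [h k, h (aKey x)]; split <;> omega)]
      simp [h0, h (aKey x)]

theorem grp_shift (l : List (List Int)) (i : Nat) :
    grpF cnt0 (restAnn cnt0 l) i = grpF cnt0 l (i + 1) := by
  unfold grpF
  rw [ann_shift l cnt0 cnt0 (fun k => rfl)]
  rw [List.filter_map, List.filter_filter, List.map_map]
  congr 1
  apply List.filter_congr
  intro p _
  simp only [Function.comp]
  by_cases h0 : p.1 = 0
  · simp [h0]
  · simp only [h0, not_false_eq_true, decide_true, Bool.and_true, decide_eq_decide]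
    omega

theorem ann_bound (l : List (List Int)) (cnt : Option Int → Nat) (c : Nat)
    (hc : ∀ k, cnt k ≤ c) : ∀ p ∈ annF cnt l, p.1 < c + l.length := by
  induction l generalizing cnt c with
  | nil => simp [annF]
  | cons x xs ih =>
    intro p hp
    simp only [annF, List.mem_cons] at hp
    rcases hp with rfl | hp
    · have := hc (aKey x); simp; omega
    · have h2 : ∀ k, bump cnt (aKey x) k ≤ c + 1 := by
        intro k; unfold bump; have := hc k; have := hc (aKey x); split <;> omega
      have := ih (bump cnt (aKey x)) (c + 1) h2 p hp
      simp only [List.length_cons]; omega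

theorem grp_empty (l : List (List Int)) (i : Nat) (h : l.length ≤ i) : grpF cnt0 l i = [] := by
  unfold grpF
  have hb := ann_bound l cnt0 0 (fun _ => le_rfl)
  have : (annF cnt0 l).filter (fun p => p.1 = i) = [] := by
    apply List.filter_eq_nil_iff.mpr
    intro p hp
    have := hb p hp
    simp; omega
  rw [this]; simp

theorem joinUpTo_pad (l : List (List Int)) (a b : Nat) (hab : a ≤ b)
    (h : ∀ j, a ≤ j → grpF cnt0 l j = []) : joinUpTo l b = joinUpTo l a := by
  unfold joinUpTo
  have hb : b = a + (b - a) := by omega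
  rw [hb, List.range_add, List.map_append, List.flatten_append]
  have : (List.map (fun x => a + x) (List.range (b - a))).map (fun i => grpF cnt0 l i)
      = (List.range (b - a)).map (fun _ => ([] : List (List Int))) := by
    rw [List.map_map]
    apply List.map_congr_left
    intro j _
    exact h (a + j) (by omega)
  rw [this]
  simp

theorem grp_nil (i : Nat) : grpF cnt0 [] i = [] := by simp [grpF, annF]

theorem aPass_fst (l : List (List Int)) :
    (aPass l).1.filterMap id = restAnn cnt0 l := by
  obtain ⟨h1, _⟩ := A_pass l cnt0 [] [] [] (by simp [cnt0])
  unfold aPass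
  rw [h1, List.nil_append, restAnn_filterMap]
  rfl

theorem aPass_snd (l : List (List Int)) : (aPass l).2.2 = grpF cnt0 l 0 := by
  obtain ⟨_, h2⟩ := A_pass l cnt0 [] [] [] (by simp [cnt0])
  unfold aPass
  rw [h2]
  simp

theorem A_char (n : Nat) : ∀ (l : List (List Int)) (last : List (List Int)), l.length ≤ n →
    tri_loop l last = last ++ joinUpTo l l.length := by
  induction n with
  | zero =>
    intro l last h
    have hl : l = [] := List.eq_nil_of_length_eq_zero (by omega)
    subst hl
    rw [tri_loop]
    simp [aPass, joinUpTo]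
  | succ n ih =>
    intro l last hlen
    rw [tri_loop]
    simp only [aPass_fst, aPass_snd]
    by_cases h : restAnn cnt0 l ≠ []
    · rw [dif_pos h]
      have hdec : (restAnn cnt0 l).length < l.length := by
        have := aPass_dec l (by rw [aPass_fst]; exact h)
        rwa [aPass_fst] at this
      have hln : l.length - 1 + 1 = l.length := by
        rcases l with _ | _
        · simp [restAnn, annF] at h
        · simp
      rw [ih (restAnn cnt0 l) (last ++ grpF cnt0 l 0) (by omega)]
      rw [List.append_assoc]
      congr 1
      have expand : joinUpTo l l.length
          = grpF cnt0 l 0 ++ joinUpTo (restAnn cnt0 l) (l.length - 1) := by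
        conv_lhs => rw [← hln]
        unfold joinUpTo
        rw [List.range_succ_eq_map, List.map_cons, List.flatten_cons, List.map_map]
        congr 2
        apply List.map_congr_left
        intro j _
        simp only [Function.comp]
        exact (grp_shift l j).symm
      rw [expand]
      congr 1
      exact (joinUpTo_pad (restAnn cnt0 l) (restAnn cnt0 l).length (l.length - 1)
        (by omega) (fun j hj => grp_empty _ j hj)).symm
    · rw [dif_neg h]
      rw [not_not] at h
      congr 1
      rcases l with _ | ⟨x, xs⟩
      · simp [joinUpTo, grpF, annF]
      · have hlen1 : (x :: xs).length = (x :: xs).length - 1 + 1 := by simp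
        have hpad : joinUpTo (x :: xs) (x :: xs).length = joinUpTo (x :: xs) 1 := by
          apply joinUpTo_pad _ 1 _ (by simp)
          intro j hj
          have : grpF cnt0 (x :: xs) j = grpF cnt0 (restAnn cnt0 (x :: xs)) (j - 1) := by
            rw [grp_shift]
            congr 1
            omega
          rw [this, h, grp_nil]
        rw [hpad]
        simp [joinUpTo]

theorem bucket_step (bs : List (List (List Int))) (i : Nat) (x : List Int) (hi : i ≤ bs.length) :
    (∀ j, ((if i = bs.length then bs ++ [[]] else bs).modify i (· ++ [x])).getD j []
        = bs.getD j [] ++ (if j = i then [x] else []))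
    ∧ ((if i = bs.length then bs ++ [[]] else bs).modify i (· ++ [x])).length
        = (if i = bs.length then bs.length + 1 else bs.length) := by
  refine ⟨?_, by split_ifs with he <;> simp [List.length_modify]⟩
  intro j
  rw [List.getD_eq_getElem?_getD, List.getD_eq_getElem?_getD, List.getElem?_modify]
  by_cases hj : i = j
  · subst hj
    by_cases he : i = bs.length
    · rw [if_pos he, he, List.getElem?_append_right (le_refl bs.length)]
      simp
    · have hlt : i < bs.length := by omega
      rw [if_neg he, List.getElem?_eq_getElem hlt]
      simp
  · simp only [if_neg hj, if_neg (fun h : j = i => hj h.symm), List.append_nil]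
    by_cases he : i = bs.length
    · rw [if_pos he]
      by_cases hjl : j < bs.length
      · rw [List.getElem?_append_left hjl]; simp
      · rw [List.getElem?_eq_none (by omega : bs.length ≤ j),
            List.getElem?_append_right (by omega : bs.length ≤ j),
            List.getElem?_eq_none (by simp; omega)]
        simp
    · rw [if_neg he]; simp

theorem B_fold (l : List (List Int)) (d : PySem.Dict (Option Int) Nat)
    (bs : List (List (List Int))) (cnt : Option Int → Nat)
    (hd : ∀ k, d.getD k 0 = cnt k) (hb : ∀ k, cnt k ≤ bs.length) :
    bs.length ≤ (l.foldl bStep (d, bs)).2.length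
    ∧ (l.foldl bStep (d, bs)).2.length ≤ bs.length + l.length
    ∧ (∀ i, (l.foldl bStep (d, bs)).2.getD i [] = bs.getD i [] ++ grpF cnt l i) := by
  induction l generalizing d bs cnt with
  | nil => simp [grpF, annF]
  | cons x xs ih =>
    simp only [List.foldl_cons, bStep]
    have hk : d.getD (PySem.List.pyGet? x 0) 0 = cnt (aKey x) := hd (aKey x)
    rw [hk]
    obtain ⟨key, len⟩ := bucket_step bs (cnt (aKey x)) x (hb (aKey x))
    set bs1 := (if cnt (aKey x) = bs.length then bs ++ [[]] else bs).modify (cnt (aKey x)) (· ++ [x]) with hbs1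
    have hd' : ∀ k, (d.insert (PySem.List.pyGet? x 0) (cnt (aKey x) + 1)).getD k 0 = bump cnt (aKey x) k := by
      intro k
      rw [PySem.Dict.getD_insert]
      unfold bump aKey
      split_ifs with h1 <;> simp [hd k]
    have hb' : ∀ k, bump cnt (aKey x) k ≤ bs1.length := by
      intro k
      rw [len]
      unfold bump
      have := hb k
      have := hb (aKey x)
      split_ifs with h1 h2 <;> omega
    obtain ⟨l1, l2, geq⟩ := ih (d.insert (PySem.List.pyGet? x 0) (cnt (aKey x) + 1)) bs1 (bump cnt (aKey x)) hd' hb'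
    have hlen1 : bs.length ≤ bs1.length := by rw [len]; split_ifs <;> omega
    have hlen2 : bs1.length ≤ bs.length + 1 := by rw [len]; split_ifs <;> omega
    refine ⟨by omega, by simp only [List.length_cons]; omega, ?_⟩
    intro i
    rw [geq i, key i]
    have hgrp : grpF cnt (x :: xs) i = (if i = cnt (aKey x) then [x] else []) ++ grpF (bump cnt (aKey x)) xs i := by
      unfold grpF
      simp only [annF, List.filter_cons]
      by_cases h1 : cnt (aKey x) = i
      · simp [h1]
      · simp [h1]
        omega
    rw [hgrp, List.append_assoc]

theorem list_eq_map_getD_range {α : Type} (L : List α) (d : α) :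
    (List.range L.length).map (fun i => L.getD i d) = L := by
  induction L with
  | nil => simp
  | cons x L ih =>
    simp [List.range_succ_eq_map, List.map_map, Function.comp_def]
    exact ih

theorem B_char (l : List (List Int)) (last : List (List Int)) :
    tri_loop_alt l last = last ++ joinUpTo l l.length := by
  unfold tri_loop_alt
  obtain ⟨hl1, hl2, hg⟩ := B_fold l PySem.Dict.empty [] cnt0
    (fun k => PySem.Dict.getD_empty k 0) (fun k => by simp [cnt0])
  simp only [List.length_nil, Nat.zero_add] at hl2
  have hget : ∀ i, (l.foldl bStep (PySem.Dict.empty, [])).2.getD i [] = grpF cnt0 l i := by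
    intro i
    rw [hg i]
    simp
  rw [PySem.List.foldl_append_eq_flatMap (fun b => b) (l.foldl bStep (PySem.Dict.empty, [])).2 last]
  congr 1
  have hflat : (l.foldl bStep (PySem.Dict.empty, [])).2.flatMap (fun b => b)
      = joinUpTo l (l.foldl bStep (PySem.Dict.empty, [])).2.length := by
    rw [List.flatMap_id']
    unfold joinUpTo
    congr 1
    conv_lhs => rw [← list_eq_map_getD_range (l.foldl bStep (PySem.Dict.empty, [])).2 []]
    apply List.map_congr_left
    intro j _
    exact hget j
  rw [hflat]
  exact (joinUpTo_pad l _ _ hl2 (fun j hj => by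
    rw [← hget j, List.getD_eq_default _ _ hj])).symm

-- ===== VERDICT (by name: the statement is the Claim_ definition above) =====
theorem tri_loop_spec : Claim_equal_tri_loop := by
  intro tab last _ _
  unfold Spec_tri_loop
  rw [B_char, A_char tab.length tab last le_rfl]
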